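-- pv_equiv track=rewrite | github.com/amygee1209/baekjun | 프로그래머스/2/42586. 기능개발/기능개발.py | solution
-- ===== SOURCE A (Python) =====
-- from collections import deque
-- import math
--
-- def solution(progresses, speeds):
--     result = []
--
--     workTimeQueue = deque()
--     for i in range(len(progresses)):
--         workTime = math.ceil((100-progresses[i])/speeds[i])
--         workTimeQueue.append(workTime)
--
--     untilNextDeploy = workTimeQueue[0]
--     deployAmount = 0
--     while workTimeQueue:
--         workTime = workTimeQueue.popleft()
--         if workTime <= untilNextDeploy:
--             deployAmount += 1
--         else:
--             result.append(deployAmount)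
--             untilNextDeploy = workTime
--             workTimeQueue.appendleft(workTime)
--             deployAmount = 0
--
--     result.append(deployAmount)
--     return result
-- ===== SOURCE B (Python) =====
-- import math
-- from itertools import accumulate, groupby
--
-- def solution(progresses, speeds):
--     # Staged pipeline: finish times -> actual deploy day of each feature
--     # (running maximum of finish times) -> run lengths of equal deploy days.
--     times = [math.ceil((100 - progresses[i]) / speeds[i])
--              for i in range(len(progresses))]
--     deploy_days = accumulate(times, max)
--     return [len(list(g)) for _, g in groupby(deploy_days)]
-- ===== Notes on version B (the rewrite author's own statement) =====
-- stated objective: idiomatic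
-- what changed: B replaces A's deque simulation with sentinel re-insertion by a staged itertools pipeline: compute each finish time, turn it into the actual deploy day via accumulate(times, max) (running maximum), and read the answer off as run lengths of consecutive equal deploy days with groupby; no queue, no re-insertion, no running deploy counter against a threshold.
import Mathlib
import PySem

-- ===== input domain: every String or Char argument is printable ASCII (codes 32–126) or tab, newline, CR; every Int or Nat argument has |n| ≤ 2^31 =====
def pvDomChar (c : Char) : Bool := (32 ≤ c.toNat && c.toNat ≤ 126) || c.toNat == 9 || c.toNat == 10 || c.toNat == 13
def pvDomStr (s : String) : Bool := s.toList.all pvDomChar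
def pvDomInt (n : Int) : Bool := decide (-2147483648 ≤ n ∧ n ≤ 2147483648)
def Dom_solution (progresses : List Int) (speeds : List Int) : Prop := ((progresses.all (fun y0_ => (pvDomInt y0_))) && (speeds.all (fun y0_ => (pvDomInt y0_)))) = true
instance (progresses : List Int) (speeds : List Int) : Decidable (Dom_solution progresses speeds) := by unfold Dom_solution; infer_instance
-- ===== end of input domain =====

-- B is a staged itertools pipeline (finish times, running-maximum deploy days via
-- accumulate, run lengths via groupby) instead of A's deque simulation; same cost.

-- shared helper: math.ceil((100-p)/s) — exact rational ceiling; exact for Python's float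
-- division on Dom since |100 - p| ≤ 2^31 + 100 < 2^53 (s = 0, where Python raises, is outside Pre_)
def pyCeilDiv (a : Int) (b : Int) : Int := -(PySem.Int.floordiv (-a) b)

-- ===== PORT A =====
-- for i in range(len(progresses)): workTimeQueue.append(math.ceil((100-progresses[i])/speeds[i]))
def buildTimes (progresses : List Int) (speeds : List Int) : List Int :=
  (PySem.List.pyRange 0 (progresses.length : Int) 1).foldl
    (fun acc i =>
      acc ++ [pyCeilDiv (100 - PySem.List.pyGetD progresses i 0) (PySem.List.pyGetD speeds i 0)])
    []

-- the while loop over the deque; fuel bounds the iterations (each element is popped at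
-- most twice: once via the appendleft sentinel re-insertion), so 2*len+1 fuel is enough
def loopA : Nat → List Int → Int → Int → List Int → List Int
  | 0, _, _, _, result => result
  | fuel+1, q, untilNextDeploy, deployAmount, result =>
    match q with
    | [] => result ++ [deployAmount]
    | w :: rest =>
      if w ≤ untilNextDeploy then loopA fuel rest untilNextDeploy (deployAmount + 1) result
      else loopA fuel (w :: rest) w 0 (result ++ [deployAmount])

def solution (progresses : List Int) (speeds : List Int) : List Int :=
  let q := buildTimes progresses speeds
  match q with
  | [] => []   -- Python raises IndexError at workTimeQueue[0]; excluded by Pre_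
  | u0 :: _ => loopA (2 * q.length + 1) q u0 0 []

-- ===== PORT B =====
-- times = [math.ceil((100 - progresses[i]) / speeds[i]) for i in range(len(progresses))]
def timesB (progresses : List Int) (speeds : List Int) : List Int :=
  (List.range progresses.length).map
    (fun (i : Nat) => pyCeilDiv (100 - PySem.List.pyGetD progresses (i : Int) 0)
                                (PySem.List.pyGetD speeds (i : Int) 0))

-- itertools.accumulate(times, max): running maxima
def accMaxGo : Int → List Int → List Int
  | m, [] => [m]
  | m, t :: ts => m :: accMaxGo (max m t) ts

def accMax : List Int → List Int
  | [] => []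
  | t :: ts => accMaxGo t ts

-- [len(list(g)) for _, g in groupby(days)]: run lengths of consecutive equal elements
def rlGo : Int → Int → List Int → List Int
  | _, n, [] => [n]
  | x, n, y :: ys => if y = x then rlGo x (n + 1) ys else n :: rlGo y 1 ys

def runLengths : List Int → List Int
  | [] => []
  | x :: xs => rlGo x 1 xs

def solution_alt (progresses : List Int) (speeds : List Int) : List Int :=
  runLengths (accMax (timesB progresses speeds))

-- ===== PRECONDITION & SPEC =====
-- exactly where A returns: nonempty input (else workTimeQueue[0] → IndexError), speeds at
-- least as long as progresses (else speeds[i] → IndexError), and no zero speed among the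
-- ones A divides by (else ZeroDivisionError)
def Pre_solution (progresses : List Int) (speeds : List Int) : Prop :=
  progresses ≠ [] ∧ progresses.length ≤ speeds.length ∧
    ∀ x ∈ speeds.take progresses.length, x ≠ 0

instance (progresses : List Int) (speeds : List Int) : Decidable (Pre_solution progresses speeds) := by
  unfold Pre_solution; infer_instance

def pvWitness_solution : List Int × List Int := ([93, 30, 55], [1, 30, 5])

def Spec_solution (progresses : List Int) (speeds : List Int) (out : List Int) : Prop := out = solution_alt progresses speeds
instance (progresses : List Int) (speeds : List Int) (out : List Int) : Decidable (Spec_solution progresses speeds out) := by unfold Spec_solution; infer_instance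

-- ===== CLAIM (what is proved, stated in full; the proofs are below) =====
def Claim_equal_solution : Prop := ∀ (progresses : List Int) (speeds : List Int), Dom_solution progresses speeds → Pre_solution progresses speeds → Spec_solution progresses speeds (solution progresses speeds)

-- ===== LEMMAS AND PROOFS =====

-- structural rendering of A's while loop (one step per queue element)
def loopA' : List Int → Int → Int → List Int
  | [], _, d => [d]
  | w :: rest, u, d => if w ≤ u then loopA' rest u (d + 1) else d :: loopA' rest w 1

theorem loopA_fuel (q : List Int) : ∀ (fuel : Nat) (u d : Int) (r : List Int),
    2 * q.length + 1 ≤ fuel → loopA fuel q u d r = r ++ loopA' q u d := by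
  induction q with
  | nil =>
    intro fuel u d r h
    obtain ⟨f, rfl⟩ : ∃ f, fuel = f + 1 := ⟨fuel - 1, by omega⟩
    simp [loopA, loopA']
  | cons w rest ih =>
    intro fuel u d r h
    simp only [List.length_cons] at h
    obtain ⟨f, rfl⟩ : ∃ f, fuel = f + 1 := ⟨fuel - 1, by omega⟩
    by_cases hw : w ≤ u
    · rw [loopA, if_pos hw, ih f u (d + 1) r (by omega), loopA', if_pos hw]
    · rw [loopA, if_neg hw]
      obtain ⟨f', rfl⟩ : ∃ f', f = f' + 1 := ⟨f - 1, by omega⟩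
      rw [loopA, if_pos (le_refl w)]
      rw [show (0:Int)+1 = 1 from rfl, ih f' w 1 (r ++ [d]) (by omega)]
      simp [loopA', hw]

-- A's loop from state (threshold m, current count n) is run-length counting of the
-- running maxima: each queue element w contributes max m w to the day stream, and
-- 'w ≤ m' is exactly 'the day does not change'
theorem loopA'_eq_rlGo (ts : List Int) : ∀ (m n : Int),
    loopA' ts m n = rlGo m n (accMaxGo m ts).tail := by
  induction ts with
  | nil => intro m n; simp [loopA', accMaxGo, rlGo]
  | cons w rest ih =>
    intro m n
    by_cases hw : w ≤ m
    · have hm : max m w = m := max_eq_left hw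
      cases rest with
      | nil => simp [loopA', accMaxGo, rlGo, hw]
      | cons z zs =>
        rw [loopA', if_pos hw, ih m (n + 1)]
        simp [accMaxGo, hm, rlGo]
    · have hm : max m w = w := max_eq_right (le_of_not_ge hw)
      have hne : w ≠ m := fun h => hw (le_of_eq h)
      cases rest with
      | nil => simp [loopA', accMaxGo, rlGo, hw, hm, hne]
      | cons z zs =>
        rw [loopA', if_neg hw, ih w 1]
        simp [accMaxGo, hm, rlGo, hne]

theorem buildTimes_eq (progresses speeds : List Int) :
    buildTimes progresses speeds = timesB progresses speeds := by
  unfold buildTimes timesB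
  rw [PySem.List.foldl_append_singleton_eq_map, List.nil_append, PySem.List.pyRange_one]
  simp only [sub_zero, Int.toNat_natCast, zero_add, List.map_map]
  rfl

-- ===== VERDICT (by name: the statement is the Claim_ definition above) =====
theorem solution_spec : Claim_equal_solution := by
  intro progresses speeds _ hpre
  obtain ⟨hne, -, -⟩ := hpre
  unfold Spec_solution solution solution_alt
  rw [buildTimes_eq]
  cases hq : timesB progresses speeds with
  | nil =>
    exfalso
    have := congrArg List.length hq
    simp [timesB] at this
    exact hne this
  | cons t ts =>
    simp only
    rw [loopA_fuel _ _ _ _ _ (le_refl _), List.nil_append,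
      loopA', if_pos (le_refl t), loopA'_eq_rlGo]
    simp [accMax, runLengths]
    cases ts with
    | nil => simp [accMaxGo, rlGo]
    | cons z zs => simp [accMaxGo]
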